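-- pv_equiv track=rewrite | github.com/rememberyourwhy/100daysofCode | Day 3/Rollercoaster ticket price.py | age_to_price
-- ===== SOURCE A (Python) =====
-- def age_to_price(age):
--     age_to_price_dict = {"0 - 12": 5 ,
--                         "12 - 18": 7 ,
--                         "18 - 1024": 12}
--     for key in age_to_price_dict:
--         for index in range(len(key)):
--             if key[index] == "-":
--                 start_age = int(key[:index])
--                 end_age = int(key[index + 1:])
--         if age > start_age and age <= end_age:
--             return age_to_price_dict[key]
-- ===== SOURCE B (Python) =====
-- def age_to_price(age):
--     if 0 < age <= 12:
--         return 5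
--     elif 12 < age <= 18:
--         return 7
--     elif 18 < age <= 1024:
--         return 12
-- ===== Notes on version B (the rewrite author's own statement) =====
-- stated objective: simpler
-- what changed: Replaces the range-keyed dict plus per-key character scan and string-slice parsing with a direct conditional chain on the numeric bands.
import Mathlib
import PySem

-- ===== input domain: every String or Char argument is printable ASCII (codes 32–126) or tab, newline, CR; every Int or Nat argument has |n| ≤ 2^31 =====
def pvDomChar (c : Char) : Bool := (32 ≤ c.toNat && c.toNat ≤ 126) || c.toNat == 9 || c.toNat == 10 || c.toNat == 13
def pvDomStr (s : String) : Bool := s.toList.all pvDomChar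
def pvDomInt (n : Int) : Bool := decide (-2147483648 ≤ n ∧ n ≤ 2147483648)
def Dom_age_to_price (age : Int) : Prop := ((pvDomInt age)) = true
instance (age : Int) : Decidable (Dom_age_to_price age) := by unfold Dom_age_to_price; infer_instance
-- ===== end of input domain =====

-- B replaces A's range-keyed dict + per-key character scan and string parsing with a
-- direct conditional chain on the numeric bands (simpler; same values everywhere).

-- ===== PORT A =====

-- the dict literal, in insertion order
def atpDict : PySem.Dict String Int :=
  PySem.Dict.ofList [("0 - 12", 5), ("12 - 18", 7), ("18 - 1024", 12)]

-- the inner 'for index in range(len(key))' loop: scan characters, on '-' parse the two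
-- slices with int(); (none, none) stands for the still-unbound start_age/end_age
-- (every literal key contains exactly one '-', so the parses succeed and the slot is set).
def atpInner (key : String) : Option Int × Option Int :=
  (PySem.List.pyRange 0 (PySem.Str.len key) 1).foldl
    (fun se index =>
      if PySem.Str.pyGet? key index = some '-' then
        (PySem.Int.ofStr? (PySem.Str.slice key none (some index)),
         PySem.Int.ofStr? (PySem.Str.slice key (some (index + 1)) none))
      else se)
    (none, none)

-- the outer 'for key in age_to_price_dict' loop
def atpScan (age : Int) : List String → Option Int
  | [] => none
  | key :: rest =>
    match atpInner key with
    | (some s, some e) =>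
      if s < age ∧ age ≤ e then PySem.Dict.get? atpDict key else atpScan age rest
    | _ => atpScan age rest   -- unreachable on the literal keys (int() would raise in Python)

def age_to_price (age : Int) : Option Int :=
  atpScan age (PySem.Dict.keys atpDict)

-- ===== PORT B =====
def age_to_price_alt (age : Int) : Option Int :=
  if 0 < age ∧ age ≤ 12 then some 5
  else if 12 < age ∧ age ≤ 18 then some 7
  else if 18 < age ∧ age ≤ 1024 then some 12
  else none

-- ===== PRECONDITION & SPEC =====
def Spec_age_to_price (age : Int) (out : Option Int) : Prop := out = age_to_price_alt age
instance (age : Int) (out : Option Int) : Decidable (Spec_age_to_price age out) := by unfold Spec_age_to_price; infer_instance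

-- ===== CLAIM (what is proved, stated in full; the proofs are below) =====
def Claim_equal_age_to_price : Prop := ∀ (age : Int), Dom_age_to_price age → Spec_age_to_price age (age_to_price age)

-- ===== LEMMAS AND PROOFS =====

theorem atpInner_key1 : atpInner "0 - 12" = (some 0, some 12) := by decide
theorem atpInner_key2 : atpInner "12 - 18" = (some 12, some 18) := by decide
theorem atpInner_key3 : atpInner "18 - 1024" = (some 18, some 1024) := by decide

theorem atpKeys_eq : PySem.Dict.keys atpDict = ["0 - 12", "12 - 18", "18 - 1024"] := by decide

-- ===== VERDICT (by name: the statement is the Claim_ definition above) =====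
theorem age_to_price_spec : Claim_equal_age_to_price := by
  intro age _
  unfold Spec_age_to_price age_to_price age_to_price_alt
  rw [atpKeys_eq]
  simp only [atpScan, atpInner_key1, atpInner_key2, atpInner_key3]
  norm_num [PySem.Dict.get?, atpDict, PySem.Dict.ofList]
  split_ifs <;> rfl
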